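-- pv_equiv track=rewrite | github.com/KseniaGu/remnote-graph-rag | scripts/parse_langsmith_traces.py | _format_retriever_results
-- ===== SOURCE A (Python) =====
-- MAX_SOURCE_TEXT = 400       # chars of each [SOURCE] block kept
--
-- def _format_retriever_results(raw: str) -> str:
--     """Keep QUERY + [RELATION] lines; truncate each [SOURCE] block."""
--     lines = raw.split("\n")
--     out: list[str] = []
--     in_source = False
--     source_buf: list[str] = []
--
--     def _flush_source() -> None:
--         if source_buf:
--             combined = "\n".join(source_buf)
--             if len(combined) > MAX_SOURCE_TEXT:
--                 combined = (
--                     combined[:MAX_SOURCE_TEXT]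
--                     + f" ... [+{len(combined) - MAX_SOURCE_TEXT} chars SOURCE TRUNCATED]"
--                 )
--             out.append(combined)
--         source_buf.clear()
--
--     for line in lines:
--         stripped = line.strip()
--         # [SOURCE], [SOURCE PATH], [SOURCE_xxx] all start a new source block.
--         if stripped.startswith("[SOURCE"):
--             _flush_source()
--             in_source = True
--             source_buf.append(line)
--         elif stripped.startswith("[RELATION]") or stripped.startswith("QUERY:") or stripped.startswith("RETRIEVER RESULTS"):
--             _flush_source()
--             in_source = False
--             out.append(line)
--         elif in_source:
--             source_buf.append(line)
--         else:
--             out.append(line)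
--
--     _flush_source()
--     return "\n".join(out)
-- ===== SOURCE B (Python) =====
-- MAX_SOURCE_TEXT = 400
--
--
-- def _format_retriever_results(raw: str) -> str:
--     """Two-pass: first group lines into typed segments, then render each."""
--     # Pass 1: build segments.  Each segment is either ("raw", line) for a
--     # passthrough line or ("src", [lines]) for a collected [SOURCE] block.
--     segments = []
--     cur = None  # lines of the source block being collected, or None
--     for line in raw.split("\n"):
--         stripped = line.strip()
--         if stripped.startswith("[SOURCE"):
--             if cur:
--                 segments.append(("src", cur))
--             cur = [line]
--         elif (stripped.startswith("[RELATION]")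
--               or stripped.startswith("QUERY:")
--               or stripped.startswith("RETRIEVER RESULTS")):
--             if cur:
--                 segments.append(("src", cur))
--             cur = None
--             segments.append(("raw", line))
--         elif cur is not None:
--             cur.append(line)
--         else:
--             segments.append(("raw", line))
--     if cur:
--         segments.append(("src", cur))
--
--     # Pass 2: render.
--     rendered = []
--     for kind, payload in segments:
--         if kind == "raw":
--             rendered.append(payload)
--         else:
--             text = "\n".join(payload)
--             if len(text) > MAX_SOURCE_TEXT:
--                 text = (text[:MAX_SOURCE_TEXT]
--                         + f" ... [+{len(text) - MAX_SOURCE_TEXT} chars SOURCE TRUNCATED]")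
--             rendered.append(text)
--     return "\n".join(rendered)
-- ===== Notes on version B (the rewrite author's own statement) =====
-- stated objective: alternative
-- what changed: Replaces the inline flush-helper state machine with a two-pass pipeline: pass 1 groups lines into typed segments (passthrough line vs collected [SOURCE] block), pass 2 renders each segment (truncating source blocks) and joins.
import Mathlib
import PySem

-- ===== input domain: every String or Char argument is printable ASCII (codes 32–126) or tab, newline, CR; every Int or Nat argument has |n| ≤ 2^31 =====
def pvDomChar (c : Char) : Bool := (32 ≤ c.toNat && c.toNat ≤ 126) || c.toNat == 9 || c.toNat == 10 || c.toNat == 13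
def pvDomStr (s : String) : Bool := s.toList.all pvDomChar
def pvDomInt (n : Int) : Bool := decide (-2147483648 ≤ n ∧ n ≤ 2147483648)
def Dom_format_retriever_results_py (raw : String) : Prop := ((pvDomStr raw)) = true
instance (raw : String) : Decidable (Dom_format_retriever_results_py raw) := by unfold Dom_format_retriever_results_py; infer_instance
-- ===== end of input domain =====

-- B replaces A's inline flush-helper state machine by a two-pass pipeline (segment, then render); alternative decomposition, same cost.
-- Python 'x + y' on strings is ported as PySem.Str.join "" [x, y, …] (exact: plain concatenation).

-- ===== PORT A =====
-- combined truncation inside _flush_source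
def pvRenderA (buf : List String) : String :=
  let combined := PySem.Str.join "\n" buf
  if 400 < PySem.Str.len combined then
    PySem.Str.join "" [PySem.Str.slice combined none (some 400), " ... [+",
      PySem.Int.toStr (PySem.Str.len combined - 400), " chars SOURCE TRUNCATED]"]
  else combined

-- _flush_source: appends the rendered buffer to out when the buffer is nonempty
def pvFlushA (out : List String) (buf : List String) : List String :=
  if buf.isEmpty then out else out ++ [pvRenderA buf]

def format_retriever_results_py (raw : String) : String :=
  let lines := ((PySem.Str.split? raw "\n").getD [])
  let st := lines.foldl (fun (st : List String × Bool × List String) line =>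
    let out := st.1
    let in_source := st.2.1
    let source_buf := st.2.2
    let stripped := PySem.Str.strip line
    if PySem.Str.startswith stripped "[SOURCE" then
      (pvFlushA out source_buf, true, [line])
    else if PySem.Str.startswith stripped "[RELATION]" || PySem.Str.startswith stripped "QUERY:"
        || PySem.Str.startswith stripped "RETRIEVER RESULTS" then
      (pvFlushA out source_buf ++ [line], false, [])
    else if in_source then
      (out, in_source, source_buf ++ [line])
    else
      (out ++ [line], in_source, source_buf)) ([], false, [])
  PySem.Str.join "\n" (pvFlushA st.1 st.2.2)

-- ===== PORT B =====
-- a segment: passthrough line (inl) or collected source-block lines (inr)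
-- 'if cur: segments.append(("src", cur))' — truthiness: none and some [] both skip
def pvClose (segs : List (String ⊕ List String)) (cur : Option (List String)) :
    List (String ⊕ List String) :=
  match cur with
  | none => segs
  | some b => if b.isEmpty then segs else segs ++ [Sum.inr b]

-- pass 1: group lines into segments
def pvSegments (lines : List String) : List (String ⊕ List String) :=
  let st := lines.foldl (fun (st : List (String ⊕ List String) × Option (List String)) line =>
    let segs := st.1
    let cur := st.2
    let stripped := PySem.Str.strip line
    if PySem.Str.startswith stripped "[SOURCE" then
      (pvClose segs cur, some [line])
    else if PySem.Str.startswith stripped "[RELATION]" || PySem.Str.startswith stripped "QUERY:"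
        || PySem.Str.startswith stripped "RETRIEVER RESULTS" then
      (pvClose segs cur ++ [Sum.inl line], none)
    else
      match cur with
      | some b => (segs, some (b ++ [line]))
      | none => (segs ++ [Sum.inl line], none)) ([], none)
  pvClose st.1 st.2

-- pass 2: render one segment
def pvRenderSeg : String ⊕ List String → String
  | Sum.inl line => line
  | Sum.inr payload =>
    let text := PySem.Str.join "\n" payload
    if 400 < PySem.Str.len text then
      PySem.Str.join "" [PySem.Str.slice text none (some 400), " ... [+",
        PySem.Int.toStr (PySem.Str.len text - 400), " chars SOURCE TRUNCATED]"]
    else text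

def format_retriever_results_py_alt (raw : String) : String :=
  PySem.Str.join "\n" ((pvSegments (((PySem.Str.split? raw "\n").getD []))).map pvRenderSeg)

-- ===== PRECONDITION & SPEC =====
def Spec_format_retriever_results_py (raw : String) (out : String) : Prop :=
  out = format_retriever_results_py_alt raw
instance (raw : String) (out : String) : Decidable (Spec_format_retriever_results_py raw out) := by
  unfold Spec_format_retriever_results_py; infer_instance

-- ===== CLAIM (what is proved, stated in full; the proofs are below) =====
def Claim_equal_format_retriever_results_py : Prop :=
  ∀ (raw : String), Dom_format_retriever_results_py raw →
    Spec_format_retriever_results_py raw (format_retriever_results_py raw)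

-- ===== LEMMAS AND PROOFS =====

-- abstraction: B's segmentation state seen through A's eyes
def pvAbs (st : List (String ⊕ List String) × Option (List String)) :
    List String × Bool × List String :=
  (st.1.map pvRenderSeg, st.2.isSome, st.2.getD [])

theorem pvFlush_close (segs : List (String ⊕ List String)) (cur : Option (List String)) :
    pvFlushA (segs.map pvRenderSeg) (cur.getD []) = (pvClose segs cur).map pvRenderSeg := by
  cases cur with
  | none => simp [pvFlushA, pvClose]
  | some b =>
    by_cases hb : b.isEmpty <;> simp [pvFlushA, pvClose, hb, pvRenderA, pvRenderSeg]

theorem pvStep_sim (st : List (String ⊕ List String) × Option (List String)) (line : String) :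
    (let out := (pvAbs st).1
     let in_source := (pvAbs st).2.1
     let source_buf := (pvAbs st).2.2
     let stripped := PySem.Str.strip line
     if PySem.Str.startswith stripped "[SOURCE" then
       (pvFlushA out source_buf, true, [line])
     else if PySem.Str.startswith stripped "[RELATION]" || PySem.Str.startswith stripped "QUERY:"
         || PySem.Str.startswith stripped "RETRIEVER RESULTS" then
       (pvFlushA out source_buf ++ [line], false, ([] : List String))
     else if in_source then
       (out, in_source, source_buf ++ [line])
     else
       (out ++ [line], in_source, source_buf))
    = pvAbs
      (let segs := st.1
       let cur := st.2
       let stripped := PySem.Str.strip line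
       if PySem.Str.startswith stripped "[SOURCE" then
         (pvClose segs cur, some [line])
       else if PySem.Str.startswith stripped "[RELATION]" || PySem.Str.startswith stripped "QUERY:"
           || PySem.Str.startswith stripped "RETRIEVER RESULTS" then
         (pvClose segs cur ++ [Sum.inl line], none)
       else
         match cur with
         | some b => (segs, some (b ++ [line]))
         | none => (segs ++ [Sum.inl line], none)) := by
  obtain ⟨segs, cur⟩ := st
  cases cur with
  | none =>
    dsimp only [pvAbs]
    split_ifs with h1 h2 h3 <;>
      simp_all [pvFlushA, pvClose, pvAbs, pvRenderSeg, pvRenderA]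
  | some b =>
    dsimp only [pvAbs]
    split_ifs with h1 h2 h3 <;> by_cases hb : b.isEmpty <;>
      simp_all [pvFlushA, pvClose, pvAbs, pvRenderSeg, pvRenderA, hb]

theorem pvLoop_sim (lines : List String)
    (st : List (String ⊕ List String) × Option (List String)) :
    lines.foldl (fun (st : List String × Bool × List String) line =>
      let out := st.1
      let in_source := st.2.1
      let source_buf := st.2.2
      let stripped := PySem.Str.strip line
      if PySem.Str.startswith stripped "[SOURCE" then
        (pvFlushA out source_buf, true, [line])
      else if PySem.Str.startswith stripped "[RELATION]" || PySem.Str.startswith stripped "QUERY:"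
          || PySem.Str.startswith stripped "RETRIEVER RESULTS" then
        (pvFlushA out source_buf ++ [line], false, [])
      else if in_source then
        (out, in_source, source_buf ++ [line])
      else
        (out ++ [line], in_source, source_buf)) (pvAbs st)
    = pvAbs (lines.foldl
        (fun (st : List (String ⊕ List String) × Option (List String)) line =>
          let segs := st.1
          let cur := st.2
          let stripped := PySem.Str.strip line
          if PySem.Str.startswith stripped "[SOURCE" then
            (pvClose segs cur, some [line])
          else if PySem.Str.startswith stripped "[RELATION]" || PySem.Str.startswith stripped "QUERY:"
              || PySem.Str.startswith stripped "RETRIEVER RESULTS" then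
            (pvClose segs cur ++ [Sum.inl line], none)
          else
            match cur with
            | some b => (segs, some (b ++ [line]))
            | none => (segs ++ [Sum.inl line], none)) st) := by
  induction lines generalizing st with
  | nil => rfl
  | cons l rest ih =>
    simp only [List.foldl_cons]
    rw [pvStep_sim st l]
    exact ih _

-- ===== VERDICT (by name: the statement is the Claim_ definition above) =====
theorem format_retriever_results_py_spec : Claim_equal_format_retriever_results_py := by
  intro raw _
  unfold Spec_format_retriever_results_py format_retriever_results_py format_retriever_results_py_alt pvSegments
  have h := pvLoop_sim (((PySem.Str.split? raw "\n").getD []))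
    (([] : List (String ⊕ List String)), (none : Option (List String)))
  simp only [pvAbs, List.map_nil, Option.isSome_none, Option.getD_none] at h
  simp only [h]
  rw [pvFlush_close]
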